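-- pv_equiv track=rewrite | github.com/XinliYu/utix | _util/general_ext.py | accumulate_ranges
-- ===== SOURCE A (Python) =====
-- def accumulate_ranges(it, start=None):
--     if start is None:
--         it = iter(it)
--         start = next(it)
--     for x in it:
--         end = start + x
--         yield start, end
--         start = end
-- ===== SOURCE B (Python) =====
-- from itertools import accumulate, tee
--
-- def accumulate_ranges(it, start=None):
--     if start is None:
--         it = iter(it)
--         start = next(it)
--     sums_a, sums_b = tee(accumulate(it, initial=start))
--     next(sums_b, None)
--     yield from zip(sums_a, sums_b)
-- ===== Notes on version B (the rewrite author's own statement) =====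
-- stated objective: idiomatic
-- what changed: Replaces the manual running accumulator loop with a pairwise (zip of tee'd streams) traversal of the prefix-sum stream built by itertools.accumulate.
import Mathlib
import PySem

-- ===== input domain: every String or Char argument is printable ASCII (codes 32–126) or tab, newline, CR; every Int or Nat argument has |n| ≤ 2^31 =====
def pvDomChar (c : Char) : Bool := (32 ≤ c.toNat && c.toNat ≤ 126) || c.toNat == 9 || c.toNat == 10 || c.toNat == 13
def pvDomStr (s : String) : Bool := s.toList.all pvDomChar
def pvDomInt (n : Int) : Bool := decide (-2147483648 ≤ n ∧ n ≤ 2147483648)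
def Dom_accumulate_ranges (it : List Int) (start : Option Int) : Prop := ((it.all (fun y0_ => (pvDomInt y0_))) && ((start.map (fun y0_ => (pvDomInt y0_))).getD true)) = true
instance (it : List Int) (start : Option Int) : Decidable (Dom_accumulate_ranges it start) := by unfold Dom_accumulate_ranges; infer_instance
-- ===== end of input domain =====

-- B replaces the manual running-sum loop with a pairwise zip over the prefix-sum stream (objective: idiomatic).

-- ===== PORT A =====
-- the generator's for-loop: yields (start, start+x) and carries the new start
def arLoopA : List Int → Int → List (Int × Int)
  | [], _ => []
  | x :: xs, s => (s, s + x) :: arLoopA xs (s + x)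

def accumulate_ranges (it : List Int) (start : Option Int) : List (Int × Int) :=
  match start with
  | some s => arLoopA it s
  | none =>
    match it with
    | [] => []            -- A raises here (StopIteration→RuntimeError); excluded by Pre_
    | h :: t => arLoopA t h

-- ===== PORT B =====
-- zip(a, b) where b is the same prefix-sum stream advanced by one
def arPairwise (sums : List Int) : List (Int × Int) := sums.zip sums.tail

def accumulate_ranges_alt (it : List Int) (start : Option Int) : List (Int × Int) :=
  match start with
  | some s => arPairwise (it.scanl (· + ·) s)   -- accumulate(it, initial=start)
  | none =>
    match it with
    | [] => []            -- next(it) raises; excluded by Pre_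
    | h :: t => arPairwise (t.scanl (· + ·) h)

-- ===== PRECONDITION & SPEC =====
-- Pre_ excludes only the input where A raises: start=None with an empty iterable.
def Pre_accumulate_ranges (it : List Int) (start : Option Int) : Prop :=
  start = none → it ≠ []
instance (it : List Int) (start : Option Int) : Decidable (Pre_accumulate_ranges it start) := by
  unfold Pre_accumulate_ranges; infer_instance
def pvWitness_accumulate_ranges : List Int × Option Int := ([1, 2, 3], none)

def Spec_accumulate_ranges (it : List Int) (start : Option Int) (out : List (Int × Int)) : Prop := out = accumulate_ranges_alt it start
instance (it : List Int) (start : Option Int) (out : List (Int × Int)) : Decidable (Spec_accumulate_ranges it start out) := by unfold Spec_accumulate_ranges; infer_instance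

-- ===== CLAIM (what is proved, stated in full; the proofs are below) =====
def Claim_equal_accumulate_ranges : Prop := ∀ (it : List Int) (start : Option Int), Dom_accumulate_ranges it start → Pre_accumulate_ranges it start → Spec_accumulate_ranges it start (accumulate_ranges it start)

-- ===== LEMMAS AND PROOFS =====
theorem arLoopA_eq_pairwise_scanl (xs : List Int) (s : Int) :
    arLoopA xs s = arPairwise (xs.scanl (· + ·) s) := by
  induction xs generalizing s with
  | nil => simp [arLoopA, arPairwise]
  | cons x xs ih =>
    simp [arLoopA, arPairwise, List.scanl] at ih ⊢
    rw [ih (s + x)]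
    cases xs <;> simp [List.scanl]

-- ===== VERDICT (by name: the statement is the Claim_ definition above) =====
theorem accumulate_ranges_spec : Claim_equal_accumulate_ranges := by
  intro it start _ hpre
  unfold Spec_accumulate_ranges accumulate_ranges accumulate_ranges_alt
  match start with
  | some s => exact arLoopA_eq_pairwise_scanl it s
  | none =>
    match it with
    | [] => exact absurd rfl (hpre rfl)
    | h :: t => exact arLoopA_eq_pairwise_scanl t h
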